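-- pv_equiv track=rewrite | github.com/kaluginpeter/Algorithms_and_structures_tasks | Python_Solutions/CodeWars/6kyu/Return_String_As_Sorted_Blocks.py | blocks
-- ===== SOURCE A (Python) =====
-- from collections import Counter
--
-- def blocks(w):
--     s = lambda c: (c.isdigit(), c.isupper(), c)
--     l, c = [], Counter(w)
--     while c:
--         i = ''.join(sorted(c, key=s))
--         l.append(i)
--         c = c - Counter(i)
--     return '-'.join(l)
-- ===== SOURCE B (Python) =====
-- from collections import Counter
--
-- def blocks(w):
--     cnt = Counter(w)
--     order = sorted(cnt, key=lambda c: (c.isdigit(), c.isupper(), c))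
--     m = max(cnt.values(), default=0)
--     return '-'.join(''.join(ch for ch in order if cnt[ch] > k) for k in range(m))
-- ===== Notes on version B (the rewrite author's own statement) =====
-- stated objective: faster
-- what changed: Instead of A's while-loop that re-sorts the remaining Counter and rebuilds it by Counter subtraction on every iteration, B counts once, sorts the distinct characters once, and emits block k as the chars whose count exceeds k.
import Mathlib
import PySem

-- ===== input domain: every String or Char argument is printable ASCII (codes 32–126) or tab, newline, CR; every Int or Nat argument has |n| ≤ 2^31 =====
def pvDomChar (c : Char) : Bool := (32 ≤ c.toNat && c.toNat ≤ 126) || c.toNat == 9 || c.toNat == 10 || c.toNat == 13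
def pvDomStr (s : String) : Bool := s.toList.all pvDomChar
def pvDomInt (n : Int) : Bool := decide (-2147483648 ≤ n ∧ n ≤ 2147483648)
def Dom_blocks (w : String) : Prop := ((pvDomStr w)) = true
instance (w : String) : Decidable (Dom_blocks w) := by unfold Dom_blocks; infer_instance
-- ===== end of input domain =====

-- B replaces A's repeated sort-and-Counter-subtract loop by one count, one sort of the
-- distinct characters, and a per-level filter (count > k); return values proved equal.

-- ===== PORT A =====
-- Python's sort key tuple (c.isdigit(), c.isupper(), c) encoded as a single Nat in exactly
-- the same (lexicographic) order: c.toNat < 1114112 for every Char, False < True as 0 < 1.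
def pyKey (c : Char) : Nat :=
  ((if PySem.Chars.isdigit c then 1 else 0) * 2 + (if PySem.Chars.isupper c then 1 else 0)) * 1114112 + c.toNat

-- Counter.__sub__ step for step: positive remainders of self's items in order, then
-- negated negative counts of other's items whose key is not in self.
def counterSub (a b : PySem.Dict Char Int) : PySem.Dict Char Int :=
  let r := a.items.foldl (fun r p =>
    let n := p.2 - b.getD p.1 0
    if 0 < n then r.insert p.1 n else r) PySem.Dict.empty
  b.items.foldl (fun r p =>
    if a.contains p.1 = false ∧ p.2 < 0 then r.insert p.1 (0 - p.2) else r) r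

-- A's while loop; the fuel argument is a totality guard only (the loop runs at most
-- max-multiplicity ≤ len w times), every branch is A's.
def loopA : Nat → PySem.Dict Char Int → List String
  | 0, _ => []
  | fuel+1, c =>
    if c.items = [] then []
    else
      let i := PySem.List.sorted c.keys pyKey false
      String.ofList i :: loopA fuel (counterSub c (PySem.Dict.counter i))

def blocks (w : String) : String :=
  PySem.Str.join "-" (loopA (w.toList.length + 1) (PySem.Dict.counter w.toList))

-- ===== PORT B =====
def blocks_alt (w : String) : String :=
  let cnt := PySem.Dict.counter w.toList
  let order := PySem.List.sorted cnt.keys pyKey false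
  let m := (PySem.List.max? cnt.values (fun v => v)).getD 0
  PySem.Str.join "-" ((PySem.List.pyRange 0 m 1).map (fun k =>
    String.ofList (order.filter (fun ch => decide (k < cnt.getD ch 0)))))

-- ===== PRECONDITION & SPEC =====
def Spec_blocks (w : String) (out : String) : Prop := out = blocks_alt w
instance (w : String) (out : String) : Decidable (Spec_blocks w out) := by unfold Spec_blocks; infer_instance

-- ===== CLAIM (what is proved, stated in full; the proofs are below) =====
def Claim_equal_blocks : Prop := ∀ (w : String), Dom_blocks w → Spec_blocks w (blocks w)

-- ===== LEMMAS AND PROOFS =====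

-- max of the toNats of a list of Ints (0 for [])
def maxN (xs : List Int) : Nat := (xs.map Int.toNat).foldr max 0

-- one Counter-subtraction step of A, at the items level
def dec (l : List (Char × Int)) : List (Char × Int) :=
  l.filterMap (fun p => if 1 < p.2 then some (p.1, p.2 - 1) else none)

lemma maxN_cons (x : Int) (xs : List Int) : maxN (x :: xs) = max x.toNat (maxN xs) := rfl

lemma maxN_le (xs : List Int) (x : Int) (hx : x ∈ xs) : x.toNat ≤ maxN xs := by
  induction xs with
  | nil => cases hx
  | cons a t ih =>
    rw [maxN_cons]
    rcases List.mem_cons.mp hx with h | h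
    · subst h; exact Nat.le_max_left _ _
    · exact le_trans (ih h) (Nat.le_max_right _ _)

lemma maxN_le_of_forall (xs : List Int) (n : Nat) (h : ∀ x ∈ xs, x.toNat ≤ n) :
    maxN xs ≤ n := by
  induction xs with
  | nil => simp [maxN]
  | cons a t ih =>
    rw [maxN_cons]
    exact max_le (h a (by simp)) (ih (fun x hx => h x (by simp [hx])))

lemma maxN_mem (xs : List Int) (h : xs ≠ []) : ∃ x ∈ xs, maxN xs ≤ x.toNat := by
  induction xs with
  | nil => simp at h
  | cons a t ih =>
    cases t with
    | nil => exact ⟨a, by simp, by rw [maxN_cons]; simp [maxN]⟩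
    | cons b u =>
      obtain ⟨x, hx, hle⟩ := ih (by simp)
      by_cases hc : maxN (b :: u) ≤ a.toNat
      · exact ⟨a, by simp, by rw [maxN_cons]; omega⟩
      · exact ⟨x, by simp [List.mem_cons.mp hx], by rw [maxN_cons]; omega⟩

lemma mem_dec (l : List (Char × Int)) (q : Char × Int) :
    q ∈ dec l ↔ ∃ p ∈ l, 1 < p.2 ∧ q = (p.1, p.2 - 1) := by
  simp only [dec, List.mem_filterMap]
  constructor
  · rintro ⟨p, hp, he⟩
    by_cases h : 1 < p.2
    · simp [h] at he; exact ⟨p, hp, h, he.symm⟩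
    · simp [h] at he
  · rintro ⟨p, hp, h1, he⟩
    exact ⟨p, hp, by simp [h1, he]⟩

lemma keys_dec (l : List (Char × Int)) :
    (dec l).map (·.1) = (l.filter (fun p => decide (1 < p.2))).map (·.1) := by
  induction l with
  | nil => rfl
  | cons p t ih =>
    by_cases h : 1 < p.2 <;> simp [dec, h, List.filter_cons] at * <;> simpa [dec] using ih

lemma char_toNat_lt (c : Char) : c.toNat < 1114112 := by
  have h : c.val.toNat.isValidChar := c.valid
  unfold Nat.isValidChar at h
  show c.val.toNat < 1114112
  omega

lemma pyKey_inj : Function.Injective pyKey := by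
  intro a b h
  have ha := char_toNat_lt a
  have hb := char_toNat_lt b
  have : a.toNat = b.toNat := by
    unfold pyKey at h
    split at h <;> split at h <;> split at h <;> split at h <;> omega
  exact Char.ext (UInt32.toNat_inj.mp this)

-- association-list lookups on a literal dict
lemma find?_key_of_mem (l : List (Char × Int)) (hnd : (l.map (·.1)).Nodup)
    (p : Char × Int) (hp : p ∈ l) : l.find? (fun q => q.1 == p.1) = some p := by
  induction l with
  | nil => cases hp
  | cons q t ih =>
    simp only [List.map_cons, List.nodup_cons] at hnd
    rcases List.mem_cons.mp hp with h | h
    · subst h; simp [List.find?_cons]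
    · have hne : (q.1 == p.1) = false := by
        simp only [beq_eq_false_iff_ne, ne_eq]
        intro he; exact hnd.1 (he ▸ List.mem_map_of_mem h)
      have hstep : List.find? (fun q => q.1 == p.1) (q :: t) = List.find? (fun q => q.1 == p.1) t := by
        simp [List.find?_cons, hne]
      rw [hstep]
      exact ih hnd.2 h

lemma getD_mk_of_mem (l : List (Char × Int)) (hnd : (l.map (·.1)).Nodup)
    (p : Char × Int) (hp : p ∈ l) (d : Int) : (PySem.Dict.mk l).getD p.1 d = p.2 := by
  simp [PySem.Dict.getD, PySem.Dict.get?, find?_key_of_mem l hnd p hp]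

lemma contains_mk_iff (l : List (Char × Int)) (ch : Char) :
    (PySem.Dict.mk l).contains ch = true ↔ ch ∈ l.map (·.1) := by
  simp [PySem.Dict.contains, List.any_eq_true, List.mem_map]

-- counterSub with its lets and lambdas beta/zeta-reduced (definitional)
lemma counterSub_def (a b : PySem.Dict Char Int) :
    counterSub a b
      = b.items.foldl (fun r p =>
          if a.contains p.1 = false ∧ p.2 < 0 then r.insert p.1 (0 - p.2) else r)
        (a.items.foldl (fun r p =>
          if 0 < p.2 - b.getD p.1 0 then r.insert p.1 (p.2 - b.getD p.1 0) else r)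
          PySem.Dict.empty) := rfl

-- first foldl of counterSub over fresh distinct keys builds exactly the filterMap
lemma foldl_sub_items (l : List (Char × Int)) (b : PySem.Dict Char Int)
    (d : PySem.Dict Char Int)
    (hfresh : ∀ p ∈ l, d.contains p.1 = false) (hnd : (l.map (·.1)).Nodup) :
    (l.foldl (fun r p =>
        if 0 < p.2 - b.getD p.1 0 then r.insert p.1 (p.2 - b.getD p.1 0) else r) d).items
      = d.items ++ l.filterMap (fun p =>
          if 0 < p.2 - b.getD p.1 0 then some (p.1, p.2 - b.getD p.1 0) else none) := by
  induction l generalizing d with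
  | nil => simp
  | cons p t ih =>
    simp only [List.map_cons, List.nodup_cons] at hnd
    have hfp := hfresh p (by simp)
    by_cases hP : 0 < p.2 - b.getD p.1 0
    · have hins : (d.insert p.1 (p.2 - b.getD p.1 0)).items = d.items ++ [(p.1, p.2 - b.getD p.1 0)] := by
        simp [PySem.Dict.insert, hfp]
      have hfresh' : ∀ q ∈ t, (d.insert p.1 (p.2 - b.getD p.1 0)).contains q.1 = false := by
        intro q hq
        have h1 : p.1 ≠ q.1 := fun he => hnd.1 (he ▸ List.mem_map_of_mem hq)
        have h2 := hfresh q (by simp [hq])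
        simp only [PySem.Dict.insert, hfp, if_neg] at *
        simp [PySem.Dict.contains, List.any_append] at *
        refine ⟨h2, ?_⟩
        intro he
        first
          | exact h1 he
          | exact h1 he.symm
      simp only [List.foldl_cons, if_pos hP]
      rw [ih _ hfresh' hnd.2, hins, List.filterMap_cons]
      have hP' : b.getD p.1 0 < p.2 := by omega
      simp [hP']
    · simp only [List.foldl_cons, if_neg hP]
      rw [ih _ (fun q hq => hfresh q (by simp [hq])) hnd.2, List.filterMap_cons]
      have hP' : ¬ b.getD p.1 0 < p.2 := by omega
      simp [hP']

-- second foldl of counterSub does nothing when every key of b occurs in a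
lemma foldl_sub_noop (l : List (Char × Int)) (a r : PySem.Dict Char Int)
    (h : ∀ p ∈ l, a.contains p.1 = true) :
    l.foldl (fun r p => if a.contains p.1 = false ∧ p.2 < 0 then r.insert p.1 (0 - p.2) else r) r = r := by
  induction l generalizing r with
  | nil => rfl
  | cons p t ih =>
    have := h p (by simp)
    simp only [List.foldl_cons]
    rw [if_neg (by simp [this]), ih _ (fun q hq => h q (by simp [hq]))]

-- the Counter-subtraction A performs equals `dec` on the items
lemma counterSub_eq_dec (l : List (Char × Int)) (hnd : (l.map (·.1)).Nodup) :
    counterSub (PySem.Dict.mk l)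
        (PySem.Dict.counter (PySem.List.sorted ((PySem.Dict.mk l).keys) pyKey false))
      = PySem.Dict.mk (dec l) := by
  have hkeys : (PySem.Dict.mk l).keys = l.map (·.1) := rfl
  have hperm : (PySem.List.sorted ((PySem.Dict.mk l).keys) pyKey false).Perm (l.map (·.1)) := by
    rw [hkeys]; exact PySem.List.sorted_perm _ _ _
  have hinodup : (PySem.List.sorted ((PySem.Dict.mk l).keys) pyKey false).Nodup :=
    hperm.nodup_iff.mpr hnd
  have hcount : ∀ p ∈ l,
      (PySem.Dict.counter (PySem.List.sorted ((PySem.Dict.mk l).keys) pyKey false)).getD p.1 0 = 1 := by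
    intro p hp
    rw [PySem.Dict.getD_counter]
    have hmem : p.1 ∈ PySem.List.sorted ((PySem.Dict.mk l).keys) pyKey false :=
      hperm.mem_iff.mpr (List.mem_map_of_mem hp)
    rw [List.count_eq_one_of_mem hinodup hmem]
    rfl
  apply PySem.Dict.ext
  rw [counterSub_def]
  rw [foldl_sub_noop]
  · rw [foldl_sub_items]
    · show _ = dec l
      rw [List.filterMap_congr (g := fun p => if 1 < p.2 then some (p.1, p.2 - 1) else none)]
      · show PySem.Dict.empty.items ++ _ = dec l
        simp [PySem.Dict.empty, dec]
      · intro p hp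
        simp only [hcount p hp]
        by_cases h1 : 1 < p.2 <;> simp [h1] <;> omega
    · intro p _
      rfl
    · exact hnd
  · intro p hp
    rw [PySem.Dict.items_counter] at hp
    obtain ⟨k, hk, hke⟩ := List.mem_map.mp hp
    have hk' : k ∈ PySem.List.sorted ((PySem.Dict.mk l).keys) pyKey false := by
      rw [← PySem.Set.mem_ofList]; exact hk
    rw [contains_mk_iff, ← hke]
    exact hperm.mem_iff.mp hk'

-- `maxN` of the values drops by exactly 1 under `dec` (nonempty, all counts ≥ 1)
lemma maxN_dec (l : List (Char × Int)) (hne : l ≠ []) (hpos : ∀ p ∈ l, 1 ≤ p.2) :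
    maxN (l.map (·.2)) = maxN ((dec l).map (·.2)) + 1 := by
  obtain ⟨x, hx, hxe⟩ := maxN_mem (l.map (·.2)) (by simpa using hne)
  have hxle := maxN_le (l.map (·.2)) x hx
  obtain ⟨p, hp, hpe⟩ := List.mem_map.mp hx
  have h1 : 1 ≤ x := hpe ▸ hpos p hp
  by_cases hbig : 1 < x
  · have hq : (p.1, p.2 - 1) ∈ dec l := (mem_dec l _).mpr ⟨p, hp, hpe ▸ hbig, rfl⟩
    have hlow : (p.2 - 1).toNat ≤ maxN ((dec l).map (·.2)) :=
      maxN_le _ _ (List.mem_map_of_mem hq)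
    have hub : maxN ((dec l).map (·.2)) ≤ maxN (l.map (·.2)) - 1 := by
      apply maxN_le_of_forall
      intro y hy
      obtain ⟨q, hq', hqe⟩ := List.mem_map.mp hy
      obtain ⟨r, hr, hr1, hre⟩ := (mem_dec l q).mp hq'
      have := maxN_le (l.map (·.2)) r.2 (List.mem_map_of_mem hr)
      subst hre; simp at hqe; omega
    omega
  · have : dec l = [] := by
      rw [List.eq_nil_iff_forall_not_mem]
      intro q hq
      obtain ⟨r, hr, hr1, _⟩ := (mem_dec l q).mp hq
      have hrle := maxN_le (l.map (·.2)) r.2 (List.mem_map_of_mem hr)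
      omega
    rw [this]
    simp only [List.map_nil]
    have h0 : maxN [] = 0 := rfl
    omega

-- sorted keys of the decremented counter = filter of the sorted keys
lemma sorted_dec (l : List (Char × Int)) (hnd : (l.map (·.1)).Nodup) :
    PySem.List.sorted ((dec l).map (·.1)) pyKey false
      = (PySem.List.sorted (l.map (·.1)) pyKey false).filter
          (fun ch => decide (1 < (PySem.Dict.mk l).getD ch 0)) := by
  apply PySem.List.sorted_eq_of_perm_of_pairwise_lt
  · have h1 : (PySem.List.sorted (l.map (·.1)) pyKey false).Perm (l.map (·.1)) :=
      PySem.List.sorted_perm _ _ _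
    have h2 := h1.filter (fun ch => decide (1 < (PySem.Dict.mk l).getD ch 0))
    have h3 : (l.map (·.1)).filter (fun ch => decide (1 < (PySem.Dict.mk l).getD ch 0))
        = (dec l).map (·.1) := by
      rw [keys_dec, List.filter_map]
      congr 1
      apply List.filter_congr
      intro p hp
      simp only [Function.comp]
      rw [getD_mk_of_mem l hnd p hp]
    exact h3 ▸ h2
  · have hp := PySem.List.sorted_pairwise (l.map (·.1)) pyKey
    have hnd' : (PySem.List.sorted (l.map (·.1)) pyKey false).Nodup :=
      (PySem.List.sorted_perm _ _ _).nodup_iff.mpr hnd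
    have hlt : (PySem.List.sorted (l.map (·.1)) pyKey false).Pairwise
        (fun a b => pyKey a < pyKey b) :=
      (hp.and hnd').imp (fun h => lt_of_le_of_ne h.1 (fun he => h.2 (pyKey_inj he)))
    exact hlt.filter _

-- keys of `dec l` stay Nodup
lemma nodup_keys_dec (l : List (Char × Int)) (hnd : (l.map (·.1)).Nodup) :
    ((dec l).map (·.1)).Nodup := by
  rw [keys_dec]
  exact hnd.sublist (List.Sublist.map _ List.filter_sublist)

-- the main loop invariant: A's loop produces exactly B's levels
lemma loopA_eq (fuel : Nat) (l : List (Char × Int))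
    (hnd : (l.map (·.1)).Nodup) (hpos : ∀ p ∈ l, 1 ≤ p.2)
    (hfuel : maxN (l.map (·.2)) ≤ fuel) :
    loopA fuel (PySem.Dict.mk l)
      = (List.range (maxN (l.map (·.2)))).map (fun (k : Nat) =>
          String.ofList ((PySem.List.sorted (l.map (·.1)) pyKey false).filter
            (fun ch => decide ((k : Int) < (PySem.Dict.mk l).getD ch 0)))) := by
  induction fuel generalizing l with
  | zero =>
    have : l = [] := by
      cases l with
      | nil => rfl
      | cons p t =>
        have h1 := hpos p (by simp)
        have h2 := maxN_le ((p :: t).map (·.2)) p.2 (by simp)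
        omega
    subst this
    simp [loopA, maxN]
  | succ f ih =>
    by_cases hl : l = []
    · subst hl
      simp [loopA, maxN]
    · rw [show loopA (f+1) (PySem.Dict.mk l)
          = String.ofList (PySem.List.sorted ((PySem.Dict.mk l).keys) pyKey false)
            :: loopA f (counterSub (PySem.Dict.mk l)
                (PySem.Dict.counter (PySem.List.sorted ((PySem.Dict.mk l).keys) pyKey false)))
        from by simp only [loopA]; rw [if_neg hl]]
      rw [counterSub_eq_dec l hnd]
      rw [ih (dec l) (nodup_keys_dec l hnd)
        (by intro q hq; obtain ⟨r, _, hr1, hre⟩ := (mem_dec l q).mp hq; subst hre; simp; omega)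
        (by have := maxN_dec l hl hpos; omega)]
      rw [maxN_dec l hl hpos]
      simp only [List.range_succ_eq_map, List.map_cons, List.map_map]
      congr 1
      · -- head block: level 0 keeps everything
        have hfull : (PySem.List.sorted (l.map (·.1)) pyKey false).filter
            (fun ch => decide (((0 : Nat) : Int) < (PySem.Dict.mk l).getD ch 0))
            = PySem.List.sorted (l.map (·.1)) pyKey false := by
          apply List.filter_eq_self.mpr
          intro ch hch
          have : ch ∈ l.map (·.1) := (PySem.List.mem_sorted _ _ _ _).mp hch
          obtain ⟨p, hp, hpe⟩ := List.mem_map.mp this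
          subst hpe
          rw [getD_mk_of_mem l hnd p hp]
          have := hpos p hp
          simp; omega
        show String.ofList (PySem.List.sorted ((PySem.Dict.mk l).keys) pyKey false)
            = String.ofList ((PySem.List.sorted (l.map (·.1)) pyKey false).filter
                (fun ch => decide (((0 : Nat) : Int) < (PySem.Dict.mk l).getD ch 0)))
        rw [hfull]
        rfl
      · -- tail blocks: level k+1 of l is level k of dec l
        apply List.map_congr_left
        intro k _
        simp only [Function.comp]
        rw [sorted_dec l hnd, List.filter_filter]
        congr 1
        · apply List.filter_congr
          intro ch hch
          have : ch ∈ l.map (·.1) := (PySem.List.mem_sorted _ _ _ _).mp hch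
          obtain ⟨p, hp, hpe⟩ := List.mem_map.mp this
          subst hpe
          rw [getD_mk_of_mem l hnd p hp]
          by_cases h2 : 1 < p.2
          · have hq : (p.1, p.2 - 1) ∈ dec l := (mem_dec l _).mpr ⟨p, hp, h2, rfl⟩
            rw [getD_mk_of_mem (dec l) (nodup_keys_dec l hnd) (p.1, p.2 - 1) hq]
            simp only [h2, decide_true, Bool.and_true]
            rw [decide_eq_decide]
            omega
          · have h1 := hpos p hp
            simp only [h2, decide_false, Bool.and_false]
            rw [eq_comm, decide_eq_false_iff_not]
            omega

-- ===== VERDICT (by name: the statement is the Claim_ definition above) =====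
theorem blocks_spec : Claim_equal_blocks := by
  intro w _
  show blocks w = blocks_alt w
  unfold blocks blocks_alt
  have hc : PySem.Dict.counter w.toList = PySem.Dict.mk ((PySem.Dict.counter w.toList).items) := by
    apply PySem.Dict.ext; rfl
  set l := (PySem.Dict.counter w.toList).items with hl
  have hnd : (l.map (·.1)).Nodup := PySem.Dict.nodup_keys_counter w.toList
  have hpos : ∀ p ∈ l, 1 ≤ p.2 := by
    intro p hp
    rw [hl, PySem.Dict.items_counter] at hp
    obtain ⟨k, hk, hke⟩ := List.mem_map.mp hp
    have : k ∈ w.toList := (PySem.Set.mem_ofList _ _).mp hk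
    have := List.count_pos_iff.mpr this
    rw [← hke]
    simp
    omega
  have hub : ∀ x ∈ l.map (·.2), x.toNat ≤ w.toList.length := by
    intro x hx
    obtain ⟨p, hp, hpe⟩ := List.mem_map.mp hx
    rw [hl, PySem.Dict.items_counter] at hp
    obtain ⟨k, _, hke⟩ := List.mem_map.mp hp
    have hcle := List.count_le_length (l := w.toList) (a := k)
    rw [← hke] at hpe
    simp at hpe
    omega
  have hfuel : maxN (l.map (·.2)) ≤ w.toList.length + 1 :=
    le_trans (maxN_le_of_forall _ _ hub) (by omega)
  rw [hc, loopA_eq (w.toList.length + 1) l hnd hpos hfuel]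
  congr 1
  -- B's range of levels is exactly range (maxN values)
  have hvals : (PySem.Dict.mk l).values = l.map (·.2) := rfl
  have hm : (PySem.List.max? ((PySem.Dict.mk l).values) (fun v => v)).getD 0
      = (maxN (l.map (·.2)) : Int) := by
    rw [hvals]
    cases hmv : PySem.List.max? (l.map (·.2)) (fun v => v) with
    | none =>
      have : l.map (·.2) = [] := (PySem.List.max?_eq_none_iff _ _).mp hmv
      rw [this]
      simp [maxN, List.map_eq_nil_iff.mp this]
    | some mv =>
      have hmem : mv ∈ l.map (·.2) := PySem.List.max?_mem hmv
      have hmax : ∀ y ∈ l.map (·.2), y ≤ mv := PySem.List.max?_isMax hmv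
      have h1 : mv.toNat ≤ maxN (l.map (·.2)) := maxN_le _ _ hmem
      have h2 : maxN (l.map (·.2)) ≤ mv.toNat := by
        apply maxN_le_of_forall
        intro y hy
        have := hmax y hy
        omega
      obtain ⟨p, hp, hpe⟩ := List.mem_map.mp hmem
      have := hpos p hp
      simp only [Option.getD_some]
      omega
  rw [hm, PySem.List.pyRange_one]
  have : ((maxN (l.map (·.2)) : Int) - 0).toNat = maxN (l.map (·.2)) := by omega
  rw [this, List.map_map]
  apply List.map_congr_left
  intro k _
  simp only [Function.comp]
  congr 1
  apply List.filter_congr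
  intro ch _
  simp
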